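-- pv_equiv track=rewrite | github.com/sebamiles/PandemicControl | immunocompromized.py | compromized_get_cells_in_range
-- ===== SOURCE A (Python) =====
-- def compromized_get_cells_in_range(x, y, r):
--     cells = []
--     for dx in range(-r, r+1):
--         for dy in range(-r, r+1):
--             nx, ny = x + dx, y + dy
--             if 0 <= nx < 10 and 0 <= ny < 10:
--                 cells.append((nx, ny))
--     return cells
-- ===== SOURCE B (Python) =====
-- def compromized_get_cells_in_range(x, y, r):
--     cells = []
--     for nx in range(10):
--         for ny in range(10):
--             if max(abs(nx - x), abs(ny - y)) <= r:
--                 cells.append((nx, ny))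
--     return cells
-- ===== Notes on version B (the rewrite author's own statement) =====
-- stated objective: faster
-- what changed: B scans the fixed 10x10 grid and keeps cells within Chebyshev distance r of (x,y), instead of enumerating the (2r+1)^2 neighborhood and filtering by grid bounds, so B does at most 100 iterations regardless of r.
import Mathlib
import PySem

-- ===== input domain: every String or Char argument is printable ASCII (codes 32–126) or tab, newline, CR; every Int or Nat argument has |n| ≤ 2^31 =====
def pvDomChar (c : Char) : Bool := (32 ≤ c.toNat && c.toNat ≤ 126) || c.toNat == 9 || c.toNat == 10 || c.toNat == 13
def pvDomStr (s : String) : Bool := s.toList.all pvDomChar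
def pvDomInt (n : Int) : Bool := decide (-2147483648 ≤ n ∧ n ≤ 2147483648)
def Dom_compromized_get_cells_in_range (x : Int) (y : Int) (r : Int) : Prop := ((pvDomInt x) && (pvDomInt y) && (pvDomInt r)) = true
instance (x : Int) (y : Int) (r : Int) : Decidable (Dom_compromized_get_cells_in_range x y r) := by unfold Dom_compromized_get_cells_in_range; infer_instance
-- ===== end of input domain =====

-- B scans the fixed 10x10 grid and filters by Chebyshev distance, instead of enumerating the (2r+1)^2 neighborhood and filtering by grid bounds (alternative algorithm, same result).


-- ===== PORT A =====
def compromized_get_cells_in_range (x : Int) (y : Int) (r : Int) : List (Int × Int) :=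
  (PySem.List.pyRange (-r) (r + 1) 1).foldl (fun cells dx =>
    (PySem.List.pyRange (-r) (r + 1) 1).foldl (fun cells dy =>
      let nx := x + dx
      let ny := y + dy
      if (0 ≤ nx ∧ nx < 10) ∧ (0 ≤ ny ∧ ny < 10) then cells ++ [(nx, ny)] else cells)
      cells) []

-- ===== PORT B =====
def compromized_get_cells_in_range_alt (x : Int) (y : Int) (r : Int) : List (Int × Int) :=
  (PySem.List.pyRange 0 10 1).foldl (fun cells nx =>
    (PySem.List.pyRange 0 10 1).foldl (fun cells ny =>
      if max |nx - x| |ny - y| ≤ r then cells ++ [(nx, ny)] else cells)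
      cells) []

-- ===== PRECONDITION & SPEC =====
def Spec_compromized_get_cells_in_range (x : Int) (y : Int) (r : Int) (out : List (Int × Int)) : Prop := out = compromized_get_cells_in_range_alt x y r
instance (x : Int) (y : Int) (r : Int) (out : List (Int × Int)) : Decidable (Spec_compromized_get_cells_in_range x y r out) := by unfold Spec_compromized_get_cells_in_range; infer_instance

-- ===== CLAIM (what is proved, stated in full; the proofs are below) =====
def Claim_equal_compromized_get_cells_in_range : Prop := ∀ (x : Int) (y : Int) (r : Int), Dom_compromized_get_cells_in_range x y r → Spec_compromized_get_cells_in_range x y r (compromized_get_cells_in_range x y r)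

-- ===== LEMMAS AND PROOFS =====

-- canonical form both sides are reduced to
def pvC (x y r : Int) : List (Int × Int) :=
  (PySem.List.pyRange (max (x - r) 0) (min (x + r + 1) 10) 1).flatMap
    (fun nx => (PySem.List.pyRange (max (y - r) 0) (min (y + r + 1) 10) 1).map (fun ny => (nx, ny)))

lemma pv_flatMap_congr {α β : Type} (l : List α) (f g : α → List β)
    (h : ∀ t ∈ l, f t = g t) : l.flatMap f = l.flatMap g := by
  induction l with
  | nil => rfl
  | cons a t ih =>
      simp only [List.flatMap_cons]
      rw [h a (by simp), ih (fun t ht => h t (by simp [ht]))]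

lemma pv_flatMap_sing {α β : Type} (f : α → β) (l : List α) :
    l.flatMap (fun t => [f t]) = l.map f := by
  induction l with
  | nil => rfl
  | cons a t ih => simp [ih]

lemma pv_filter_map_flatMap {α : Type} (Q : Int → Prop) [DecidablePred Q] (f : Int → α) (l : List Int) :
    (l.filter (fun t => decide (Q t))).map f = l.flatMap (fun t => if Q t then [f t] else []) := by
  induction l with
  | nil => rfl
  | cons a t ih =>
      by_cases h : Q a <;> simp [h, ih]

lemma pv_outer {α : Type} (G : Int → List α) (xv c d : Int) :
    ∀ (n : Nat) (a b : Int), (b - a).toNat = n →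
      (PySem.List.pyRange a b 1).flatMap (fun t => if c ≤ xv + t ∧ xv + t < d then G (xv + t) else [])
        = (PySem.List.pyRange (max (xv + a) c) (min (xv + b) d) 1).flatMap G := by
  intro n
  induction n with
  | zero =>
      intro a b hn
      rw [PySem.List.pyRange_one_eq_nil (by omega), PySem.List.pyRange_one_eq_nil (by omega)]
      rfl
  | succ n ih =>
      intro a b hn
      rw [PySem.List.pyRange_one_cons (by omega), List.flatMap_cons]
      by_cases h : c ≤ xv + a ∧ xv + a < d
      · rw [if_pos h]
        have h1 : max (xv + a) c = xv + a := by omega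
        have h2 : xv + a < min (xv + b) d := by omega
        rw [h1, PySem.List.pyRange_one_cons h2, List.flatMap_cons]
        congr 1
        rw [ih (a + 1) b (by omega)]
        have h3 : max (xv + (a + 1)) c = xv + a + 1 := by omega
        rw [h3]
      · rw [if_neg h, List.nil_append, ih (a + 1) b (by omega)]
        rcases not_and_or.mp h with h' | h'
        · have h4 : max (xv + (a + 1)) c = max (xv + a) c := by omega
          rw [h4]
        · rw [PySem.List.pyRange_one_eq_nil (by omega), PySem.List.pyRange_one_eq_nil (by omega)]

lemma pv_outer' {α : Type} (G : Int → List α) (xv c d a b : Int) :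
    (PySem.List.pyRange a b 1).flatMap (fun t => if c ≤ xv + t ∧ xv + t < d then G (xv + t) else [])
      = (PySem.List.pyRange (max (xv + a) c) (min (xv + b) d) 1).flatMap G :=
  pv_outer G xv c d (b - a).toNat a b rfl

lemma pv_range_if {α : Type} (G : Int → List α) (c d a b : Int) :
    (PySem.List.pyRange a b 1).flatMap (fun t => if c ≤ t ∧ t < d then G t else [])
      = (PySem.List.pyRange (max a c) (min b d) 1).flatMap G := by
  simpa using pv_outer' G 0 c d a b

lemma pv_A_eq_C (x y r : Int) : compromized_get_cells_in_range x y r = pvC x y r := by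
  unfold compromized_get_cells_in_range pvC
  simp only [PySem.List.foldl_append_ite, PySem.List.foldl_append_eq_flatMap, List.nil_append]
  have step1 : ∀ dx : Int,
      ((PySem.List.pyRange (-r) (r + 1) 1).filter
          (fun dy => decide ((0 ≤ x + dx ∧ x + dx < 10) ∧ (0 ≤ y + dy ∧ y + dy < 10)))).map
        (fun dy => (x + dx, y + dy))
      = if 0 ≤ x + dx ∧ x + dx < 10 then
          (PySem.List.pyRange (max (y - r) 0) (min (y + r + 1) 10) 1).map (fun ny => (x + dx, ny))
        else [] := by
    intro dx
    by_cases hP : 0 ≤ x + dx ∧ x + dx < 10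
    · rw [if_pos hP]
      rw [List.filter_congr (fun dy _ => show _ = decide (0 ≤ y + dy ∧ y + dy < 10) by
        simp [hP.1, hP.2])]
      rw [pv_filter_map_flatMap (fun dy => 0 ≤ y + dy ∧ y + dy < 10) (fun dy => (x + dx, y + dy))]
      rw [show ((PySem.List.pyRange (-r) (r + 1) 1).flatMap
            (fun dy => if 0 ≤ y + dy ∧ y + dy < 10 then [(x + dx, y + dy)] else []))
          = (PySem.List.pyRange (max (y + -r) 0) (min (y + (r + 1)) 10) 1).flatMap
              (fun ny => [(x + dx, ny)]) from
        pv_outer' (fun ny => [(x + dx, ny)]) y 0 10 (-r) (r + 1)]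
      rw [pv_flatMap_sing]
      have e1 : y + -r = y - r := by omega
      have e2 : y + (r + 1) = y + r + 1 := by omega
      rw [e1, e2]
    · rw [if_neg hP]
      rw [List.filter_eq_nil_iff.mpr ?_, List.map_nil]
      intro dy _
      simp only [decide_eq_true_eq, not_and]
      intro h1 h2
      exact absurd ⟨h1.1, h1.2⟩ hP
  rw [pv_flatMap_congr _ _ _ (fun dx _ => step1 dx)]
  rw [show ((PySem.List.pyRange (-r) (r + 1) 1).flatMap
        (fun dx => if 0 ≤ x + dx ∧ x + dx < 10 then
          (PySem.List.pyRange (max (y - r) 0) (min (y + r + 1) 10) 1).map (fun ny => (x + dx, ny))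
        else []))
      = (PySem.List.pyRange (max (x + -r) 0) (min (x + (r + 1)) 10) 1).flatMap
          (fun nx => (PySem.List.pyRange (max (y - r) 0) (min (y + r + 1) 10) 1).map
            (fun ny => (nx, ny))) from
    pv_outer' (fun nx => (PySem.List.pyRange (max (y - r) 0) (min (y + r + 1) 10) 1).map
      (fun ny => (nx, ny))) x 0 10 (-r) (r + 1)]
  have e1 : x + -r = x - r := by omega
  have e2 : x + (r + 1) = x + r + 1 := by omega
  rw [e1, e2]

lemma pv_B_eq_C (x y r : Int) : compromized_get_cells_in_range_alt x y r = pvC x y r := by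
  unfold compromized_get_cells_in_range_alt pvC
  simp only [PySem.List.foldl_append_ite, PySem.List.foldl_append_eq_flatMap, List.nil_append]
  have step1 : ∀ nx : Int,
      ((PySem.List.pyRange 0 10 1).filter (fun ny => decide (max |nx - x| |ny - y| ≤ r))).map
        (fun ny => (nx, ny))
      = if x - r ≤ nx ∧ nx < x + r + 1 then
          (PySem.List.pyRange (max (y - r) 0) (min (y + r + 1) 10) 1).map (fun ny => (nx, ny))
        else [] := by
    intro nx
    by_cases hP : x - r ≤ nx ∧ nx < x + r + 1
    · rw [if_pos hP]
      rw [List.filter_congr (fun ny _ => show _ = decide (y - r ≤ ny ∧ ny < y + r + 1) by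
        rw [decide_eq_decide, max_le_iff, abs_le, abs_le]
        omega)]
      rw [pv_filter_map_flatMap (fun ny => y - r ≤ ny ∧ ny < y + r + 1) (fun ny => (nx, ny))]
      rw [pv_range_if (fun ny => [(nx, ny)]) (y - r) (y + r + 1) 0 10]
      rw [pv_flatMap_sing]
      have e1 : max 0 (y - r) = max (y - r) 0 := by omega
      have e2 : min 10 (y + r + 1) = min (y + r + 1) 10 := by omega
      rw [e1, e2]
    · rw [if_neg hP]
      rw [List.filter_eq_nil_iff.mpr ?_, List.map_nil]
      intro ny _
      simp only [decide_eq_true_eq]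
      intro hle
      have h1 := abs_le.mp (le_trans (le_max_left _ _) hle)
      exact hP ⟨by omega, by omega⟩
  rw [pv_flatMap_congr _ _ _ (fun nx _ => step1 nx)]
  rw [pv_range_if _ (x - r) (x + r + 1) 0 10]
  have e1 : max 0 (x - r) = max (x - r) 0 := by omega
  have e2 : min 10 (x + r + 1) = min (x + r + 1) 10 := by omega
  rw [e1, e2]

-- ===== VERDICT (by name: the statement is the Claim_ definition above) =====
theorem compromized_get_cells_in_range_spec : Claim_equal_compromized_get_cells_in_range := by
  intro x y r _
  unfold Spec_compromized_get_cells_in_range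
  rw [pv_A_eq_C, pv_B_eq_C]
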